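-- pv_equiv track=rewrite | github.com/akshaychavan23031998/VectorShift | backend/main.py | check_dag
-- ===== SOURCE A (Python) =====
-- from collections import deque
-- from typing import List, Dict, Any, Optional
--
-- def check_dag(nodes: List[Dict], edges: List[Dict]) -> bool:
--     node_ids = {node["id"] for node in nodes}
--     adj: Dict[str, List[str]] = {nid: [] for nid in node_ids}
--     in_degree: Dict[str, int] = {nid: 0 for nid in node_ids}
--
--     for edge in edges:
--         src = edge.get("source")
--         tgt = edge.get("target")
--         if src in node_ids and tgt in node_ids:
--             adj[src].append(tgt)
--             in_degree[tgt] += 1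
--
--     queue = deque(nid for nid, deg in in_degree.items() if deg == 0)
--     visited = 0
--
--     while queue:
--         node = queue.popleft()
--         visited += 1
--         for neighbor in adj[node]:
--             in_degree[neighbor] -= 1
--             if in_degree[neighbor] == 0:
--                 queue.append(neighbor)
--
--     return visited == len(node_ids)
-- ===== SOURCE B (Python) =====
-- def check_dag(nodes, edges):
--     node_ids = {node["id"] for node in nodes}
--     es = [(s, t) for (s, t) in ((e.get("source"), e.get("target")) for e in edges)
--           if s in node_ids and t in node_ids]
--     alive = node_ids
--     while True:
--         new = {t for (s, t) in es if s in alive} & alive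
--         if new == alive:
--             break
--         alive = new
--     return not alive
-- ===== Notes on version B (the rewrite author's own statement) =====
-- stated objective: alternative
-- what changed: Replaces Kahn's queue-and-in-degree BFS with an iterated set-level fixpoint: repeatedly intersect the live set with the targets of edges whose source is still live until it stabilises; the graph is a DAG iff the fixpoint is empty (no queue, no counters, no adjacency map).
import Mathlib
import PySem

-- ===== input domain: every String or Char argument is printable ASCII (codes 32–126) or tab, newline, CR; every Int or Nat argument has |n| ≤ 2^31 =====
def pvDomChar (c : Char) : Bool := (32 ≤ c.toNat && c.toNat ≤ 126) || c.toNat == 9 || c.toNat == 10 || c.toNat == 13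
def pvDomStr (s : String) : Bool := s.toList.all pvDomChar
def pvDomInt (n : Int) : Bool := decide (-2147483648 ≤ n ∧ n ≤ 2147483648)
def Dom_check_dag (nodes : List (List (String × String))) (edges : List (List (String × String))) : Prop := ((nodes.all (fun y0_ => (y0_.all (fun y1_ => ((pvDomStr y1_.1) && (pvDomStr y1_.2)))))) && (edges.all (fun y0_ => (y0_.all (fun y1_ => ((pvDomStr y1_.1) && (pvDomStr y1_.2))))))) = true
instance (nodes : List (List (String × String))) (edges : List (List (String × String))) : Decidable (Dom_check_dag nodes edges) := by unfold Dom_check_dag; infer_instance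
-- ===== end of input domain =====

-- B replaces Kahn's queue-and-in-degree BFS by iterating a set-level peeling step to a fixpoint
-- (DAG iff the fixpoint is empty): a genuinely different algorithm of similar size (not faster).

-- ===== PORT A =====
-- shared by both ports (both Pythons build the same id set): node_ids = {node["id"] for node in nodes}.
-- node["id"] raises KeyError when "id" is absent — those inputs are excluded by Pre_ (the .getD "" is never reached there).
def pvIds (nodes : List (List (String × String))) : List String :=
  PySem.Set.ofList (nodes.map (fun node => ((PySem.Dict.mk node).get? "id").getD ""))

-- body of A's `for edge in edges` loop, updating (adj, in_degree).
-- adj[src].append / in_degree[tgt] += 1 are Dict.modify; the defaults are unreachable since src/tgt ∈ node_ids = the keys.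
def pvEdgeStep (ids : List String) (p : PySem.Dict String (List String) × PySem.Dict String Int)
    (edge : List (String × String)) : PySem.Dict String (List String) × PySem.Dict String Int :=
  match (PySem.Dict.mk edge).get? "source", (PySem.Dict.mk edge).get? "target" with
  | some s, some t =>
      if s ∈ ids ∧ t ∈ ids then
        (p.1.modify s [] (fun l => l ++ [t]), p.2.modify t 0 (fun x => x + 1))
      else p
  | _, _ => p

-- body of A's inner `for neighbor in adj[node]` loop (state: in_degree, queue)
def pvKahnStep (p : PySem.Dict String Int × List String) (nb : String) :
    PySem.Dict String Int × List String :=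
  let d := p.1.modify nb 0 (fun x => x - 1)
  if d.getD nb 0 == 0 then (d, p.2 ++ [nb]) else (d, p.2)

-- termination measure for A's while loop: sum of the positive parts of the stored degrees, plus queue length
def pvPosSum (d : PySem.Dict String Int) : Nat :=
  ((PySem.Set.ofList d.keys).map (fun k => (d.getD k 0).toNat)).sum

lemma ofList_append_singleton (l : List String) (x : String) :
    PySem.Set.ofList (l ++ [x]) = PySem.Set.add (PySem.Set.ofList l) x := by
  rw [PySem.Set.ofList_eq_foldl, PySem.Set.ofList_eq_foldl, List.foldl_append]
  rfl

lemma posSum_same_keys (d0 dd : PySem.Dict String Int) (nb : String)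
    (hk : dd.keys = d0.keys)
    (hmem : nb ∈ PySem.Set.ofList d0.keys) :
    pvPosSum dd = (dd.getD nb 0).toNat
      + (((PySem.Set.ofList d0.keys).erase nb).map (fun k => (dd.getD k 0).toNat)).sum := by
  unfold pvPosSum
  rw [hk, ((List.perm_cons_erase hmem).map (fun k => (dd.getD k 0).toNat)).sum_eq]
  simp

lemma pvKahnStep_measure (p : PySem.Dict String Int × List String) (nb : String) :
    pvPosSum (pvKahnStep p nb).1 + (pvKahnStep p nb).2.length ≤ pvPosSum p.1 + p.2.length := by
  obtain ⟨d0, q⟩ := p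
  have hmod : (d0.modify nb 0 fun x => x - 1) = d0.insert nb (d0.getD nb 0 - 1) := rfl
  unfold pvKahnStep
  rw [hmod]
  dsimp only
  rw [PySem.Dict.getD_insert_self]
  by_cases hc : d0.contains nb = true
  · -- key present: keys unchanged, the entry at nb drops by one
    have hkeys : (d0.insert nb (d0.getD nb 0 - 1)).keys = d0.keys :=
      PySem.Dict.keys_insert_of_contains d0 _ hc
    have hnbmem : nb ∈ PySem.Set.ofList d0.keys :=
      (PySem.Set.mem_ofList _ _).mpr ((PySem.Dict.contains_iff_mem_keys d0 nb).mp hc)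
    have hnd : (PySem.Set.ofList d0.keys).Nodup := PySem.Set.nodup_ofList _
    have h1 := posSum_same_keys d0 (d0.insert nb (d0.getD nb 0 - 1)) nb hkeys hnbmem
    have h2 := posSum_same_keys d0 d0 nb rfl hnbmem
    have hrest : (((PySem.Set.ofList d0.keys).erase nb).map
          (fun k => ((d0.insert nb (d0.getD nb 0 - 1)).getD k 0).toNat)).sum
        = (((PySem.Set.ofList d0.keys).erase nb).map (fun k => (d0.getD k 0).toNat)).sum := by
      congr 1
      apply List.map_congr_left
      intro a ha
      rw [PySem.Dict.getD_insert_of_ne d0 _ _ ((hnd.mem_erase_iff).mp ha).1]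
    rw [PySem.Dict.getD_insert_self] at h1
    by_cases hz : d0.getD nb 0 - 1 = 0
    · have hzt : ((d0.getD nb 0 - 1) == 0) = true := by simpa using hz
      simp only [hzt, if_true, List.length_append, List.length_cons, List.length_nil]
      rw [h1, hrest, h2]
      omega
    · have hzf : ((d0.getD nb 0 - 1) == 0) = false := by simpa using hz
      simp only [hzf, Bool.false_eq_true, if_false]
      rw [h1, hrest, h2]
      omega
  · -- key absent (Python would raise; totalized step appends nb ↦ -1): measure unchanged
    have hcf : d0.contains nb = false := by simpa using hc
    have holdz : d0.getD nb 0 = 0 := PySem.Dict.getD_of_not_contains d0 0 hcf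
    rw [holdz, show (0:Int) - 1 = -1 from rfl]
    have hzf : (((-1):Int) == 0) = false := by decide
    simp only [hzf, Bool.false_eq_true, if_false]
    have hnbnm : nb ∉ PySem.Set.ofList d0.keys := by
      rw [PySem.Set.mem_ofList]
      intro hm
      rw [(PySem.Dict.contains_iff_mem_keys d0 nb).mpr hm] at hcf
      exact Bool.true_eq_false.mp hcf
    have hps : pvPosSum (d0.insert nb (-1)) = pvPosSum d0 := by
      unfold pvPosSum
      rw [PySem.Dict.keys_insert_of_not_contains d0 _ hcf, ofList_append_singleton,
        PySem.Set.add_of_not_mem hnbnm, List.map_append, List.sum_append]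
      simp only [List.map_cons, List.map_nil, List.sum_cons, List.sum_nil,
        PySem.Dict.getD_insert_self]
      have hrest : ∀ a ∈ PySem.Set.ofList d0.keys,
          ((d0.insert nb (-1)).getD a 0).toNat = (d0.getD a 0).toNat := by
        intro a ha
        rw [PySem.Dict.getD_insert_of_ne d0 _ _ (by rintro rfl; exact hnbnm ha)]
      rw [List.map_congr_left hrest]
      omega
    simp [hps]

lemma pvKahnFold_measure (l : List String) (p : PySem.Dict String Int × List String) :
    pvPosSum (l.foldl pvKahnStep p).1 + (l.foldl pvKahnStep p).2.length ≤ pvPosSum p.1 + p.2.length := by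
  induction l generalizing p with
  | nil => exact le_refl _
  | cons x xs ih => exact le_trans (ih (pvKahnStep p x)) (pvKahnStep_measure p x)

-- A's `while queue:` loop
def kahnLoop (adj : PySem.Dict String (List String)) (q : List String) (visited : Int)
    (deg : PySem.Dict String Int) : Int :=
  match q with
  | [] => visited
  | node :: rest =>
      let r := (adj.getD node []).foldl pvKahnStep (deg, rest)
      kahnLoop adj r.2 (visited + 1) r.1
termination_by pvPosSum deg + q.length
decreasing_by
  have h := pvKahnFold_measure (adj.getD node []) (deg, rest)
  dsimp only at h
  simp only [List.length_cons]
  omega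

def check_dag (nodes : List (List (String × String))) (edges : List (List (String × String))) : Bool :=
  -- the `if ... then ... else false` guard only totalizes node["id"] (KeyError): Pre_ excludes its failure
  if nodes.all (fun node => ((PySem.Dict.mk node).get? "id").isSome) then
    let node_ids := pvIds nodes
    let adj0 : PySem.Dict String (List String) := node_ids.foldl (fun d nid => d.insert nid []) PySem.Dict.empty
    let indeg0 : PySem.Dict String Int := node_ids.foldl (fun d nid => d.insert nid 0) PySem.Dict.empty
    let r := edges.foldl (pvEdgeStep node_ids) (adj0, indeg0)
    let queue := (r.2.items.filter (fun kv => kv.2 == 0)).map (fun kv => kv.1)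
    let visited := kahnLoop r.1 queue 0 r.2
    visited == PySem.Set.len node_ids
  else false

-- ===== PORT B =====
-- es = [(s, t) for (s, t) in ((e.get("source"), e.get("target")) for e in edges) if s in node_ids and t in node_ids]
def pvEs (ids : List String) (edges : List (List (String × String))) : List (String × String) :=
  edges.filterMap (fun e =>
    match (PySem.Dict.mk e).get? "source", (PySem.Dict.mk e).get? "target" with
    | some s, some t => if s ∈ ids ∧ t ∈ ids then some (s, t) else none
    | _, _ => none)

-- one round of B's loop: {t for (s, t) in es if s in alive} & alive
def pvPeel (es : List (String × String)) (alive : List String) : List String :=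
  PySem.Set.inter (PySem.Set.ofList ((es.filter (fun e => decide (e.1 ∈ alive))).map (fun e => e.2))) alive

lemma nodupLenLt (l m : List String) (h : l.Nodup) (hs : ∀ x ∈ l, x ∈ m)
    (x : String) (hxm : x ∈ m) (hxl : x ∉ l) : l.length < m.length := by
  have h1 : l.toFinset ⊂ m.toFinset := by
    constructor
    · exact fun a ha => List.mem_toFinset.mpr (hs a (List.mem_toFinset.mp ha))
    · intro hc
      exact hxl (List.mem_toFinset.mp (hc (List.mem_toFinset.mpr hxm)))
  calc l.length = l.toFinset.card := (List.toFinset_card_of_nodup h).symm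
    _ < m.toFinset.card := Finset.card_lt_card h1
    _ ≤ m.length := m.toFinset_card_le

lemma pvPeel_length (es : List (String × String)) (alive : List String)
    (h : PySem.Set.equal (pvPeel es alive) alive = false) :
    (pvPeel es alive).length < alive.length := by
  have hnd : (pvPeel es alive).Nodup := PySem.Set.nodup_inter _ _ (PySem.Set.nodup_ofList _)
  have hsub : ∀ x ∈ pvPeel es alive, x ∈ alive := by
    intro x hx
    exact ((PySem.Set.mem_inter _ _ _).mp hx).2
  have hne : ¬ (∀ x, x ∈ pvPeel es alive ↔ x ∈ alive) := by
    intro hc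
    rw [(PySem.Set.equal_iff _ _).mpr hc] at h
    exact Bool.true_eq_false.mp h
  push Not at hne
  obtain ⟨x, hx⟩ := hne
  rcases hx with ⟨h1, h2⟩ | ⟨h1, h2⟩
  · exact absurd (hsub x h1) h2
  · exact nodupLenLt _ _ hnd hsub x h2 h1

-- B's `while True:` loop (terminates: each non-final round strictly shrinks alive)
def peelLoop (es : List (String × String)) (alive : List String) : List String :=
  let nw := pvPeel es alive
  if h : PySem.Set.equal nw alive then alive
  else peelLoop es nw
termination_by alive.length
decreasing_by simp only [Bool.not_eq_true] at h; exact pvPeel_length es alive h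

def check_dag_alt (nodes : List (List (String × String))) (edges : List (List (String × String))) : Bool :=
  -- same totalizing guard for node["id"] as in port A (both Pythons raise KeyError there; outside Pre_)
  if nodes.all (fun node => ((PySem.Dict.mk node).get? "id").isSome) then
    let node_ids := pvIds nodes
    let es := pvEs node_ids edges
    (peelLoop es node_ids).isEmpty
  else false

-- ===== PRECONDITION & SPEC =====
-- Pre_ excludes exactly the inputs where a node dict lacks the key "id": there A (and B) raise KeyError.
def Pre_check_dag (nodes : List (List (String × String))) (edges : List (List (String × String))) : Prop :=
  ∀ node ∈ nodes, ((PySem.Dict.mk node).get? "id").isSome = true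
instance (nodes : List (List (String × String))) (edges : List (List (String × String))) : Decidable (Pre_check_dag nodes edges) := by unfold Pre_check_dag; infer_instance

def pvWitness_check_dag : (List (List (String × String))) × (List (List (String × String))) :=
  ([[("id", "a")], [("id", "b")]], [[("source", "a"), ("target", "b")]])

def Spec_check_dag (nodes : List (List (String × String))) (edges : List (List (String × String))) (out : Bool) : Prop := out = check_dag_alt nodes edges
instance (nodes : List (List (String × String))) (edges : List (List (String × String))) (out : Bool) : Decidable (Spec_check_dag nodes edges out) := by unfold Spec_check_dag; infer_instance

-- ===== CLAIM (what is proved, stated in full; the proofs are below) =====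
def Claim_equal_check_dag : Prop := ∀ (nodes : List (List (String × String))) (edges : List (List (String × String))), Dom_check_dag nodes edges → Pre_check_dag nodes edges → Spec_check_dag nodes edges (check_dag nodes edges)

-- ===== LEMMAS AND PROOFS =====

-- abbreviations for proofs
def cntIn (es : List (String × String)) (v : String) : Nat := es.countP (fun e => e.2 == v)
def tgts (es : List (String × String)) (u : String) : List String :=
  (es.filter (fun e => e.1 == u)).map (fun e => e.2)
def fromCnt (es : List (String × String)) (D : List String) (v : String) : Nat :=
  es.countP (fun e => decide (e.1 ∈ D) && (e.2 == v))

lemma countP_or_split {α : Type} (l : List α) (p q r : α → Bool)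
    (h : ∀ x ∈ l, r x = (p x || q x)) (hd : ∀ x ∈ l, ¬(p x = true ∧ q x = true)) :
    l.countP r = l.countP p + l.countP q := by
  induction l with
  | nil => rfl
  | cons a l ih =>
    have hr := h a (List.mem_cons_self)
    have hda := hd a (List.mem_cons_self)
    rw [List.countP_cons, List.countP_cons, List.countP_cons,
      ih (fun x hx => h x (List.mem_cons_of_mem a hx)) (fun x hx => hd x (List.mem_cons_of_mem a hx)), hr]
    cases hp : p a <;> cases hq : q a <;> simp_all <;> omega

lemma countP_add_le {α : Type} (l : List α) (p q r : α → Bool)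
    (hp : ∀ x ∈ l, p x = true → r x = true) (hq : ∀ x ∈ l, q x = true → r x = true)
    (hd : ∀ x ∈ l, ¬(p x = true ∧ q x = true)) :
    l.countP p + l.countP q ≤ l.countP r := by
  induction l with
  | nil => simp
  | cons a l ih =>
    have := ih (fun x hx => hp x (List.mem_cons_of_mem a hx)) (fun x hx => hq x (List.mem_cons_of_mem a hx))
      (fun x hx => hd x (List.mem_cons_of_mem a hx))
    rw [List.countP_cons, List.countP_cons, List.countP_cons]
    have h1 := hp a List.mem_cons_self
    have h2 := hq a List.mem_cons_self
    have h3 := hd a List.mem_cons_self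
    cases hpa : p a <;> cases hqa : q a <;> simp_all <;> omega

lemma tgts_count (es : List (String × String)) (u v : String) :
    (tgts es u).count v = es.countP (fun e => (e.1 == u) && (e.2 == v)) := by
  rw [tgts, List.count_eq_countP, List.countP_map, List.countP_filter]
  apply List.countP_congr
  intro e _
  simp [Bool.and_comm]

lemma fromCnt_append_singleton (es : List (String × String)) (D : List String) (node v : String)
    (h : node ∉ D) :
    fromCnt es (D ++ [node]) v = fromCnt es D v + (tgts es node).count v := by
  rw [tgts_count, fromCnt, fromCnt]
  apply countP_or_split
  · intro e _
    by_cases h1 : e.1 ∈ D <;> by_cases h2 : e.1 = node <;> simp_all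
  · intro e _ hpq
    have h1 : e.1 ∈ D := by simpa using (Bool.and_eq_true_iff.mp hpq.1).1
    have h2 : e.1 = node := by simpa using (Bool.and_eq_true_iff.mp hpq.2).1
    exact h (h2 ▸ h1)

lemma fromCnt_le (es : List (String × String)) (D : List String) (v : String) :
    fromCnt es D v ≤ cntIn es v :=
  List.countP_mono_left (fun x _ h => by simp_all)

lemma fromCnt_pos (es : List (String × String)) (D : List String) (v : String)
    (e : String × String) (he : e ∈ es) (h2 : e.2 = v) (h1 : e.1 ∈ D) :
    1 ≤ fromCnt es D v := by
  rw [fromCnt]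
  refine Nat.one_le_iff_ne_zero.mpr (fun hz => ?_)
  have : 0 < es.countP (fun e => decide (e.1 ∈ D) && (e.2 == v)) :=
    List.countP_pos_iff.mpr ⟨e, he, by simp [h1, h2]⟩
  omega

lemma cntIn_lt_witness (es : List (String × String)) (D : List String) (v : String)
    (h : fromCnt es D v < cntIn es v) : ∃ e ∈ es, e.2 = v ∧ e.1 ∉ D := by
  by_contra hc
  push Not at hc
  have : cntIn es v ≤ fromCnt es D v := by
    apply List.countP_mono_left
    intro x hx hp
    have h2 : x.2 = v := by simpa using hp
    simp [h2, hc x hx h2]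
  omega

lemma pvEs_mem (ids : List String) (edges : List (List (String × String))) :
    ∀ e ∈ pvEs ids edges, e.1 ∈ ids ∧ e.2 ∈ ids := by
  intro e he
  obtain ⟨a, _, ha⟩ := List.mem_filterMap.mp he
  revert ha
  cases (PySem.Dict.mk a).get? "source" with
  | none => simp
  | some s =>
    cases (PySem.Dict.mk a).get? "target" with
    | none => simp
    | some t =>
      by_cases hin : s ∈ ids ∧ t ∈ ids
      · simp only [if_pos hin]
        rintro h
        obtain rfl : (s, t) = e := by simpa using h
        exact hin
      · simp [if_neg hin]

-- the single loop over edges equals the two simple modify-folds over the filtered edge list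
lemma edge_fold_fusion (ids : List String) (edges : List (List (String × String))) :
    ∀ (a : PySem.Dict String (List String)) (dg : PySem.Dict String Int),
    edges.foldl (pvEdgeStep ids) (a, dg)
      = ((pvEs ids edges).foldl (fun d p => d.modify p.1 [] (fun x => x ++ [p.2])) a,
         (pvEs ids edges).foldl (fun d p => d.modify p.2 0 (fun x => x + 1)) dg) := by
  induction edges with
  | nil => intro a dg; rfl
  | cons e l ih =>
    intro a dg
    rw [List.foldl_cons, pvEs, List.filterMap_cons]
    show l.foldl (pvEdgeStep ids) (pvEdgeStep ids (a, dg) e) = _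
    rw [pvEdgeStep]
    cases hs : (PySem.Dict.mk e).get? "source" with
    | none => simpa [pvEs] using ih a dg
    | some s =>
      cases ht : (PySem.Dict.mk e).get? "target" with
      | none => simpa [pvEs] using ih a dg
      | some t =>
        by_cases hin : s ∈ ids ∧ t ∈ ids
        · simp only [if_pos hin]
          simpa [pvEs] using ih _ _
        · simp only [if_neg hin]
          simpa [pvEs] using ih a dg

lemma getD_foldl_insert_const {ν : Type} (ids : List String) (z : ν) (u : String) :
    ∀ d : PySem.Dict String ν, d.getD u z = z →
      (ids.foldl (fun d nid => d.insert nid z) d).getD u z = z := by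
  induction ids with
  | nil => intro d h; exact h
  | cons x l ih =>
    intro d h
    rw [List.foldl_cons]
    apply ih
    by_cases hx : u = x
    · subst hx; rw [PySem.Dict.getD_insert_self]
    · rw [PySem.Dict.getD_insert_of_ne d _ _ hx, h]

-- items of the counting fold, over a key list whose shape is ids.map (v, f v)
lemma find?_map_pair (ids : List String) (f : String → Int) (t : String) (ht : t ∈ ids) :
    (ids.map (fun v => (v, f v))).find? (fun p => p.1 == t) = some (t, f t) := by
  induction ids with
  | nil => cases ht
  | cons a l ih =>
    by_cases ha : a = t
    · subst ha; simp
    · have : t ∈ l := by cases List.mem_cons.mp ht with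
        | inl h => exact absurd h.symm ha
        | inr h => exact h
      simp [ha, ih this]

lemma getD_of_items_map (d : PySem.Dict String Int) (ids : List String) (f : String → Int)
    (hitems : d.items = ids.map (fun v => (v, f v))) (t : String) (ht : t ∈ ids) :
    d.getD t 0 = f t := by
  have : d.get? t = some (f t) := by
    show ((d.items.find? (fun p => p.1 == t)).map (fun x => x.2)) = some (f t)
    rw [hitems, find?_map_pair ids f t ht]
    rfl
  simp [PySem.Dict.getD_eq_get?_getD, this]

lemma contains_of_items_map (d : PySem.Dict String Int) (ids : List String) (f : String → Int)
    (hitems : d.items = ids.map (fun v => (v, f v))) (t : String) (ht : t ∈ ids) :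
    d.contains t = true := by
  rw [PySem.Dict.contains_iff_mem_keys]
  show t ∈ d.items.map (fun p => p.1)
  rw [hitems, List.map_map]
  simpa using ht

lemma items_count_fold (ids : List String) :
    ∀ (l : List (String × String)) (f : String → Int) (d : PySem.Dict String Int),
    d.items = ids.map (fun v => (v, f v)) → (∀ p ∈ l, p.2 ∈ ids) →
    (l.foldl (fun d p => d.modify p.2 0 (fun x => x + 1)) d).items
      = ids.map (fun v => (v, f v + ((l.map (fun e => e.2)).count v : Int))) := by
  intro l
  induction l with
  | nil =>
    intro f d hd _
    simpa using hd
  | cons p l ih =>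
    intro f d hd hmem
    rw [List.foldl_cons]
    have hc : d.contains p.2 = true := contains_of_items_map d ids f hd p.2 (hmem p List.mem_cons_self)
    have hmod : (d.modify p.2 0 (fun x => x + 1)) = d.insert p.2 (d.getD p.2 0 + 1) := rfl
    have hval : d.getD p.2 0 = f p.2 := getD_of_items_map d ids f hd p.2 (hmem p List.mem_cons_self)
    have hitems' : (d.modify p.2 0 (fun x => x + 1)).items
        = ids.map (fun v => (v, if v = p.2 then f v + 1 else f v)) := by
      rw [hmod, PySem.Dict.items_insert_of_contains d _ hc, hd, List.map_map]
      apply List.map_congr_left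
      intro v _
      by_cases hv : v = p.2
      · subst hv; simp [hval]
      · simp [Function.comp, hv]
    rw [ih (fun v => if v = p.2 then f v + 1 else f v) _ hitems'
      (fun q hq => hmem q (List.mem_cons_of_mem p hq))]
    apply List.map_congr_left
    intro v _
    by_cases hv : v = p.2
    · subst hv; simp; omega
    · have : (p.2 == v) = false := by simpa using (fun h => hv h.symm)
      simp [List.count_cons, hv, this]

-- combined bound used twice: a node of F still has positive residual degree
lemma F_residual (es : List (String × String)) (F : List String)
    (hFfix : ∀ v ∈ F, ∃ e ∈ es, e.2 = v ∧ e.1 ∈ F)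
    (node : String) (D : List String) (hDnode : node ∉ D)
    (hDF : ∀ v ∈ F, v ∉ D ∧ v ≠ node)
    (v : String) (hv : v ∈ F) :
    fromCnt es D v + (tgts es node).count v + 1 ≤ cntIn es v := by
  obtain ⟨e, he, he2, he1⟩ := hFfix v hv
  have hb : fromCnt es (D ++ [node]) v + fromCnt es F v ≤ cntIn es v := by
    apply countP_add_le
    · intro x _ hx; simpa using (Bool.and_eq_true_iff.mp hx).2
    · intro x _ hx; simpa using (Bool.and_eq_true_iff.mp hx).2
    · intro x _ hx
      have h1 : x.1 ∈ D ++ [node] := by simpa using (Bool.and_eq_true_iff.mp hx.1).1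
      have h2 : x.1 ∈ F := by simpa using (Bool.and_eq_true_iff.mp hx.2).1
      obtain ⟨hnD, hnn⟩ := hDF x.1 h2
      rcases List.mem_append.mp h1 with h | h
      · exact hnD h
      · exact hnn (by simpa using h)
  have h1 : 1 ≤ fromCnt es F v := fromCnt_pos es F v e he he2 he1
  rw [fromCnt_append_singleton es D node v hDnode] at hb
  omega

lemma foldInv (es : List (String × String)) (ids F : List String)
    (hFfix : ∀ v ∈ F, ∃ e ∈ es, e.2 = v ∧ e.1 ∈ F)
    (node : String) (D : List String) (hDnode : node ∉ D)
    (hDF : ∀ v ∈ F, v ∉ D ∧ v ≠ node) :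
    ∀ (l : List String) (k : String → Nat) (d : PySem.Dict String Int) (q : List String),
    (∀ v, k v + l.count v ≤ (tgts es node).count v) →
    (∀ v, d.getD v 0 = (cntIn es v : Int) - (fromCnt es D v : Int) - (k v : Int)) →
    ((D ++ [node]) ++ q).Nodup →
    (∀ v ∈ (D ++ [node]) ++ q, v ∈ ids) →
    (∀ v ∈ ids, (v ∈ (D ++ [node]) ++ q ↔ d.getD v 0 ≤ 0)) →
    (∀ v ∈ F, v ∉ q) →
    (∀ v ∈ l, v ∈ ids) →
    (∀ v, (l.foldl pvKahnStep (d, q)).1.getD v 0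
        = (cntIn es v : Int) - (fromCnt es D v : Int) - ((k v : Int) + (l.count v : Int)))
    ∧ ((D ++ [node]) ++ (l.foldl pvKahnStep (d, q)).2).Nodup
    ∧ (∀ v ∈ (D ++ [node]) ++ (l.foldl pvKahnStep (d, q)).2, v ∈ ids)
    ∧ (∀ v ∈ ids, (v ∈ (D ++ [node]) ++ (l.foldl pvKahnStep (d, q)).2
        ↔ (l.foldl pvKahnStep (d, q)).1.getD v 0 ≤ 0))
    ∧ (∀ v ∈ F, v ∉ (l.foldl pvKahnStep (d, q)).2) := by
  intro l
  induction l with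
  | nil =>
    intro k d q hl hdeg hnd hmem hiff hFq _
    refine ⟨fun v => by simpa using hdeg v, hnd, hmem, hiff, hFq⟩
  | cons nb l' ih =>
    intro k d q hl hdeg hnd hmem hiff hFq hlids
    have hnbids : nb ∈ ids := hlids nb List.mem_cons_self
    have hstep : pvKahnStep (d, q) nb
        = (if ((d.insert nb (d.getD nb 0 - 1)).getD nb 0 == 0) = true
            then ((d.insert nb (d.getD nb 0 - 1)), q ++ [nb])
            else ((d.insert nb (d.getD nb 0 - 1)), q)) := rfl
    have hself : (d.insert nb (d.getD nb 0 - 1)).getD nb 0 = d.getD nb 0 - 1 :=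
      PySem.Dict.getD_insert_self d nb _ _
    have hd1 : ∀ v, (d.insert nb (d.getD nb 0 - 1)).getD v 0
        = if v = nb then d.getD nb 0 - 1 else d.getD v 0 := by
      intro v
      by_cases hv : v = nb
      · subst hv; simp [hself]
      · rw [PySem.Dict.getD_insert_of_ne d _ _ hv, if_neg hv]
    have hdeg1 : ∀ v, (d.insert nb (d.getD nb 0 - 1)).getD v 0
        = (cntIn es v : Int) - (fromCnt es D v : Int)
          - ((if v = nb then k v + 1 else k v : Nat) : Int) := by
      intro v
      rw [hd1 v]
      by_cases hv : v = nb
      · subst hv; rw [if_pos rfl, if_pos rfl, hdeg v]; push_cast; omega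
      · rw [if_neg hv, if_neg hv, hdeg v]
    have hl' : ∀ v, (if v = nb then k v + 1 else k v) + l'.count v ≤ (tgts es node).count v := by
      intro v
      have := hl v
      by_cases hv : v = nb
      · subst hv; rw [if_pos rfl]; rw [List.count_cons_self] at this; omega
      · rw [if_neg hv]
        rw [List.count_cons_of_ne (fun h => hv h.symm)] at this
        exact this
    have hcnt_conv : ∀ v, ((if v = nb then k v + 1 else k v : Nat) : Int) + (l'.count v : Int)
        = (k v : Int) + ((nb :: l').count v : Int) := by
      intro v
      by_cases hv : v = nb
      · subst hv; rw [if_pos rfl, List.count_cons_self]; push_cast; omega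
      · rw [if_neg hv, List.count_cons_of_ne (fun h => hv h.symm)]
    rw [List.foldl_cons, hstep]
    by_cases hz : d.getD nb 0 - 1 = 0
    · -- degree hits zero: nb is appended to the queue
      have hzt : ((d.insert nb (d.getD nb 0 - 1)).getD nb 0 == 0) = true := by
        rw [hself]; simpa using hz
      rw [if_pos hzt]
      have hold : d.getD nb 0 = 1 := by omega
      have hnbnotmem : nb ∉ (D ++ [node]) ++ q := by
        intro hmem'
        have := (hiff nb hnbids).mp hmem'
        omega
      have hnbF : nb ∉ F := by
        intro hF
        have hres := F_residual es F hFfix node D hDnode hDF nb hF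
        have hkk := hl nb
        rw [List.count_cons_self] at hkk
        have := hdeg nb
        omega
      have hnd' : ((D ++ [node]) ++ (q ++ [nb])).Nodup := by
        rw [← List.append_assoc]
        refine List.Nodup.append ?_ ?_ ?_
        · exact hnd
        · exact List.nodup_singleton nb
        · intro a ha hb
          obtain rfl : a = nb := by simpa using hb
          exact hnbnotmem ha
      have hmem' : ∀ v ∈ (D ++ [node]) ++ (q ++ [nb]), v ∈ ids := by
        intro v hv
        rw [← List.append_assoc] at hv
        rcases List.mem_append.mp hv with h | h
        · exact hmem v h
        · obtain rfl : v = nb := by simpa using h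
          exact hnbids
      have hiff' : ∀ v ∈ ids, (v ∈ (D ++ [node]) ++ (q ++ [nb])
          ↔ (d.insert nb (d.getD nb 0 - 1)).getD v 0 ≤ 0) := by
        intro v hvids
        rw [hd1 v, ← List.append_assoc]
        by_cases hv : v = nb
        · subst hv
          rw [if_pos rfl]
          constructor
          · intro _; omega
          · intro _; exact List.mem_append.mpr (Or.inr (List.mem_singleton.mpr rfl))
        · rw [if_neg hv]
          have : v ∈ ((D ++ [node]) ++ q) ++ [nb] ↔ v ∈ (D ++ [node]) ++ q := by
            constructor
            · intro h
              rcases List.mem_append.mp h with h | h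
              · exact h
              · exact absurd (by simpa using h) hv
            · intro h; exact List.mem_append.mpr (Or.inl h)
          rw [this]
          exact hiff v hvids
      have hFq' : ∀ v ∈ F, v ∉ q ++ [nb] := by
        intro v hv hmemq
        rcases List.mem_append.mp hmemq with h | h
        · exact hFq v hv h
        · obtain rfl : v = nb := by simpa using h
          exact hnbF hv
      have := ih (fun v => if v = nb then k v + 1 else k v) (d.insert nb (d.getD nb 0 - 1))
        (q ++ [nb]) hl' hdeg1 hnd' hmem' hiff' hFq' (fun v hv => hlids v (List.mem_cons_of_mem nb hv))
      refine ⟨fun v => ?_, this.2.1, this.2.2.1, this.2.2.2.1, this.2.2.2.2⟩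
      rw [this.1 v, ← hcnt_conv v]
    · -- degree does not hit zero: queue unchanged
      have hzf : ((d.insert nb (d.getD nb 0 - 1)).getD nb 0 == 0) = false := by
        rw [hself]; simpa using hz
      rw [if_neg (by rw [hzf]; exact Bool.false_ne_true)]
      have hiff' : ∀ v ∈ ids, (v ∈ (D ++ [node]) ++ q
          ↔ (d.insert nb (d.getD nb 0 - 1)).getD v 0 ≤ 0) := by
        intro v hvids
        rw [hd1 v]
        by_cases hv : v = nb
        · subst hv
          rw [if_pos rfl, hiff v hvids]
          omega
        · rw [if_neg hv]
          exact hiff v hvids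
      have := ih (fun v => if v = nb then k v + 1 else k v) (d.insert nb (d.getD nb 0 - 1))
        q hl' hdeg1 hnd hmem hiff' hFq (fun v hv => hlids v (List.mem_cons_of_mem nb hv))
      refine ⟨fun v => ?_, this.2.1, this.2.2.1, this.2.2.2.1, this.2.2.2.2⟩
      rw [this.1 v, ← hcnt_conv v]


-- outer loop invariant for kahnLoop
lemma loopInv (es : List (String × String)) (ids F : List String)
    (hFfix : ∀ v ∈ F, ∃ e ∈ es, e.2 = v ∧ e.1 ∈ F)
    (adj : PySem.Dict String (List String))
    (hadj : ∀ u, adj.getD u [] = tgts es u)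
    (htgts : ∀ u v, v ∈ tgts es u → v ∈ ids) :
    ∀ (n : Nat) (q : List String) (d : PySem.Dict String Int) (D : List String),
    pvPosSum d + q.length ≤ n →
    (D ++ q).Nodup →
    (∀ v ∈ D ++ q, v ∈ ids) →
    (∀ v, d.getD v 0 = (cntIn es v : Int) - (fromCnt es D v : Int)) →
    (∀ v ∈ ids, (v ∈ D ++ q ↔ d.getD v 0 ≤ 0)) →
    (∀ v ∈ F, v ∉ D ++ q) →
    ∃ (Df : List String) (df : PySem.Dict String Int),
      kahnLoop adj q (D.length : Int) d = (Df.length : Int)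
      ∧ Df.Nodup ∧ (∀ v ∈ Df, v ∈ ids)
      ∧ (∀ v, df.getD v 0 = (cntIn es v : Int) - (fromCnt es Df v : Int))
      ∧ (∀ v ∈ ids, (v ∈ Df ↔ df.getD v 0 ≤ 0))
      ∧ (∀ v ∈ F, v ∉ Df) := by
  intro n
  induction n with
  | zero =>
    intro q d D hle hnd hmem hdeg hiff hF
    cases q with
    | nil =>
      refine ⟨D, d, by rw [kahnLoop], by simpa using hnd, by simpa using hmem,
        hdeg, by simpa using hiff, by simpa using hF⟩
    | cons node rest => simp [List.length_cons] at hle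
  | succ n ihn =>
    intro q d D hle hnd hmem hdeg hiff hF
    cases q with
    | nil =>
      refine ⟨D, d, by rw [kahnLoop], by simpa using hnd, by simpa using hmem,
        hdeg, by simpa using hiff, by simpa using hF⟩
    | cons node rest =>
      rw [kahnLoop]
      have hnd' : ((D ++ [node]) ++ rest).Nodup := by
        rw [List.append_assoc, List.singleton_append]; exact hnd
      have hnodeD : node ∉ D := by
        have h1 : (D ++ [node]).Nodup := (List.nodup_append.mp hnd').1
        simp [List.nodup_append] at h1
        exact fun hc => h1.2 node hc rfl
      have hDF : ∀ v ∈ F, v ∉ D ∧ v ≠ node := by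
        intro v hv
        have := hF v hv
        constructor
        · intro hc; exact this (List.mem_append.mpr (Or.inl hc))
        · intro hc; exact this (List.mem_append.mpr (Or.inr (by simp [hc])))
      have hFq : ∀ v ∈ F, v ∉ rest := by
        intro v hv hc
        exact hF v hv (List.mem_append.mpr (Or.inr (by simp [hc])))
      have hmem' : ∀ v ∈ (D ++ [node]) ++ rest, v ∈ ids := by
        intro v hv
        apply hmem
        rw [List.append_assoc, List.singleton_append] at hv
        exact hv
      have hiff' : ∀ v ∈ ids, (v ∈ (D ++ [node]) ++ rest ↔ d.getD v 0 ≤ 0) := by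
        intro v hv
        rw [List.append_assoc, List.singleton_append]
        exact hiff v hv
      have hdeg' : ∀ v, d.getD v 0 = (cntIn es v : Int) - (fromCnt es D v : Int) - ((0:Nat) : Int) := by
        intro v; rw [hdeg v]; push_cast; ring
      have hfold := foldInv es ids F hFfix node D hnodeD hDF (adj.getD node []) (fun _ => 0) d rest
        (by intro v; rw [hadj node]; dsimp only; omega)
        hdeg' hnd' hmem' hiff' hFq
        (by intro v hv; exact htgts node v (by rw [hadj node] at hv; exact hv))
      obtain ⟨hfdeg, hfnd, hfmem, hfiff, hfF⟩ := hfold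
      have hmeas := pvKahnFold_measure (adj.getD node []) (d, rest)
      dsimp only at hmeas
      simp only [List.length_cons] at hle
      have hdeg2 : ∀ v, ((adj.getD node []).foldl pvKahnStep (d, rest)).1.getD v 0
          = (cntIn es v : Int) - (fromCnt es (D ++ [node]) v : Int) := by
        intro v
        rw [hfdeg v, fromCnt_append_singleton es D node v hnodeD, hadj node]
        push_cast
        ring
      have hF2 : ∀ v ∈ F, v ∉ (D ++ [node]) ++ ((adj.getD node []).foldl pvKahnStep (d, rest)).2 := by
        intro v hv hc
        rcases List.mem_append.mp hc with h | h
        · rcases List.mem_append.mp h with h | h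
          · exact (hDF v hv).1 h
          · exact (hDF v hv).2 (by simpa using h)
        · exact hfF v hv h
      obtain ⟨Df, df, hkl, hprops⟩ := ihn ((adj.getD node []).foldl pvKahnStep (d, rest)).2
        ((adj.getD node []).foldl pvKahnStep (d, rest)).1 (D ++ [node])
        (by omega) hfnd hfmem hdeg2 hfiff hF2
      refine ⟨Df, df, ?_, hprops⟩
      rw [← hkl]
      have : ((D ++ [node]).length : Int) = (D.length : Int) + 1 := by
        simp [List.length_append]
      rw [this]

lemma mem_pvPeel (es : List (String × String)) (alive : List String) (v : String) :
    v ∈ pvPeel es alive ↔ (∃ e ∈ es, e.2 = v ∧ e.1 ∈ alive) ∧ v ∈ alive := by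
  rw [pvPeel, PySem.Set.mem_inter, PySem.Set.mem_ofList]
  constructor
  · rintro ⟨h1, h2⟩
    refine ⟨?_, h2⟩
    obtain ⟨e, he, hev⟩ := List.mem_map.mp h1
    have := List.mem_filter.mp he
    exact ⟨e, this.1, hev, by simpa using this.2⟩
  · rintro ⟨⟨e, he, hev, hea⟩, h2⟩
    refine ⟨List.mem_map.mpr ⟨e, List.mem_filter.mpr ⟨he, by simpa using hea⟩, hev⟩, h2⟩

lemma peelLoop_sub (es : List (String × String)) :
    ∀ (alive : List String) (v : String), v ∈ peelLoop es alive → v ∈ alive := by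
  intro alive
  induction alive using peelLoop.induct es with
  | case1 a nw heq =>
    have heq' : PySem.Set.equal (pvPeel es a) a = true := heq
    rw [peelLoop, dif_pos heq']
    exact fun v h => h
  | case2 a nw heq ih =>
    have heq' : PySem.Set.equal (pvPeel es a) a = false := by have h2 : ¬ PySem.Set.equal (pvPeel es a) a = true := heq; exact Bool.not_eq_true _ ▸ h2
    intro v hv
    rw [peelLoop, dif_neg (by simp [heq'])] at hv
    have := ih v hv
    exact ((mem_pvPeel es a v).mp this).2

lemma peelLoop_fix (es : List (String × String)) :
    ∀ (alive : List String) (v : String), v ∈ peelLoop es alive →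
      ∃ e ∈ es, e.2 = v ∧ e.1 ∈ peelLoop es alive := by
  intro alive
  induction alive using peelLoop.induct es with
  | case1 a nw heq =>
    have heq' : PySem.Set.equal (pvPeel es a) a = true := heq
    intro v hv
    rw [peelLoop, dif_pos heq'] at hv ⊢
    have hmemiff := (PySem.Set.equal_iff (pvPeel es a) a).mp heq'
    obtain ⟨⟨e, he, hev, hea⟩, _⟩ := (mem_pvPeel es a v).mp ((hmemiff v).mpr hv)
    exact ⟨e, he, hev, hea⟩
  | case2 a nw heq ih =>
    have heq' : PySem.Set.equal (pvPeel es a) a = false := by have h2 : ¬ PySem.Set.equal (pvPeel es a) a = true := heq; exact Bool.not_eq_true _ ▸ h2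
    intro v hv
    rw [peelLoop, dif_neg (by simp [heq'])] at hv ⊢
    exact ih v hv

lemma peelLoop_super (es : List (String × String)) (S : List String)
    (hS : ∀ v ∈ S, ∃ e ∈ es, e.2 = v ∧ e.1 ∈ S) :
    ∀ (alive : List String), (∀ v ∈ S, v ∈ alive) → ∀ v ∈ S, v ∈ peelLoop es alive := by
  intro alive
  induction alive using peelLoop.induct es with
  | case1 a nw heq =>
    have heq' : PySem.Set.equal (pvPeel es a) a = true := heq
    intro hsub v hv
    rw [peelLoop, dif_pos heq']
    exact hsub v hv
  | case2 a nw heq ih =>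
    have heq' : PySem.Set.equal (pvPeel es a) a = false := by have h2 : ¬ PySem.Set.equal (pvPeel es a) a = true := heq; exact Bool.not_eq_true _ ▸ h2
    intro hsub v hv
    rw [peelLoop, dif_neg (by simp [heq'])]
    refine ih ?_ v hv
    intro w hw
    obtain ⟨e, he, hev, hea⟩ := hS w hw
    exact (mem_pvPeel es a w).mpr ⟨⟨e, he, hev, hsub e.1 hea⟩, hsub w hw⟩


lemma nodupLenLe (l m : List String) (h : l.Nodup) (hs : ∀ x ∈ l, x ∈ m) :
    l.length ≤ m.length := by
  calc l.length = l.toFinset.card := (List.toFinset_card_of_nodup h).symm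
    _ ≤ m.toFinset.card := Finset.card_le_card
        (fun a ha => List.mem_toFinset.mpr (hs a (List.mem_toFinset.mp ha)))
    _ ≤ m.length := m.toFinset_card_le

lemma cntIn_eq_count (es : List (String × String)) (v : String) :
    cntIn es v = (es.map (fun e => e.2)).count v := by
  rw [cntIn, List.count_eq_countP, List.countP_map]
  rfl

lemma fromCnt_nil (es : List (String × String)) (v : String) : fromCnt es [] v = 0 := by
  simp [fromCnt]

lemma tgts_mem_ids (ids : List String) (edges : List (List (String × String))) :
    ∀ u v, v ∈ tgts (pvEs ids edges) u → v ∈ ids := by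
  intro u v hv
  obtain ⟨e, he, hev⟩ := List.mem_map.mp hv
  exact hev ▸ (pvEs_mem ids edges e (List.mem_filter.mp he).1).2

-- ===== VERDICT (by name: the statement is the Claim_ definition above) =====
theorem check_dag_spec : Claim_equal_check_dag := by
  intro nodes edges _hdom hpre
  unfold Spec_check_dag
  have hguard : (nodes.all (fun node => ((PySem.Dict.mk node).get? "id").isSome)) = true := by
    rw [List.all_eq_true]
    intro node hn
    exact hpre node hn
  rw [check_dag, check_dag_alt, if_pos hguard, if_pos hguard]
  dsimp only
  -- shared data
  have hnd : (pvIds nodes).Nodup := PySem.Set.nodup_ofList _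
  -- A-side characterizations
  have hfus := edge_fold_fusion (pvIds nodes) edges
    ((pvIds nodes).foldl (fun d nid => d.insert nid []) PySem.Dict.empty)
    ((pvIds nodes).foldl (fun d nid => d.insert nid (0:Int)) PySem.Dict.empty)
  have hadj : ∀ u, (edges.foldl (pvEdgeStep (pvIds nodes))
      (((pvIds nodes).foldl (fun d nid => d.insert nid []) PySem.Dict.empty),
       ((pvIds nodes).foldl (fun d nid => d.insert nid (0:Int)) PySem.Dict.empty))).1.getD u []
      = tgts (pvEs (pvIds nodes) edges) u := by
    intro u
    rw [hfus]
    dsimp only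
    rw [PySem.Dict.getD_foldl_modify_append (pvEs (pvIds nodes) edges) _ u]
    rw [getD_foldl_insert_const (pvIds nodes) [] u PySem.Dict.empty (by simp [pysem])]
    rw [List.nil_append]
    rfl
  have hindeg : ∀ v, (edges.foldl (pvEdgeStep (pvIds nodes))
      (((pvIds nodes).foldl (fun d nid => d.insert nid []) PySem.Dict.empty),
       ((pvIds nodes).foldl (fun d nid => d.insert nid (0:Int)) PySem.Dict.empty))).2.getD v 0
      = (cntIn (pvEs (pvIds nodes) edges) v : Int) := by
    intro v
    rw [hfus]
    dsimp only
    have hswap : List.foldl (fun (d : PySem.Dict String Int) (p : String × String) =>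
          d.modify p.2 0 (fun y => y + 1))
        ((pvIds nodes).foldl (fun d nid => d.insert nid (0:Int)) PySem.Dict.empty)
        (pvEs (pvIds nodes) edges)
        = List.foldl (fun d x => d.modify x 0 (fun y => y + 1))
          ((pvIds nodes).foldl (fun d nid => d.insert nid (0:Int)) PySem.Dict.empty)
          ((pvEs (pvIds nodes) edges).map (fun e => e.2)) := by
      rw [List.foldl_map]
    rw [hswap]
    rw [PySem.Dict.getD_foldl_modify_add_one]
    rw [getD_foldl_insert_const (pvIds nodes) (0:Int) v PySem.Dict.empty (by simp [pysem])]
    rw [cntIn_eq_count]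
    omega
  have hitems : (edges.foldl (pvEdgeStep (pvIds nodes))
      (((pvIds nodes).foldl (fun d nid => d.insert nid []) PySem.Dict.empty),
       ((pvIds nodes).foldl (fun d nid => d.insert nid (0:Int)) PySem.Dict.empty))).2.items
      = (pvIds nodes).map (fun v => (v, (cntIn (pvEs (pvIds nodes) edges) v : Int))) := by
    rw [hfus]
    dsimp only
    have hinit : (((pvIds nodes).foldl (fun d nid => d.insert nid (0:Int)) PySem.Dict.empty)).items
        = (pvIds nodes).map (fun v => (v, (0:Int))) := by
      have := PySem.Dict.items_foldl_insert_fresh (pvIds nodes) (fun v => v) (fun _ => (0:Int))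
        PySem.Dict.empty (by intro a _; simp [pysem]) (by simpa using hnd)
      simpa using this
    rw [items_count_fold (pvIds nodes) (pvEs (pvIds nodes) edges) (fun _ => (0:Int)) _ hinit
      (fun p hp => (pvEs_mem (pvIds nodes) edges p hp).2)]
    apply List.map_congr_left
    intro v _
    rw [cntIn_eq_count]
    norm_num
  have hqueue : (((edges.foldl (pvEdgeStep (pvIds nodes))
      (((pvIds nodes).foldl (fun d nid => d.insert nid []) PySem.Dict.empty),
       ((pvIds nodes).foldl (fun d nid => d.insert nid (0:Int)) PySem.Dict.empty))).2.items.filter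
        (fun kv => kv.2 == 0)).map (fun kv => kv.1))
      = (pvIds nodes).filter (fun v => ((cntIn (pvEs (pvIds nodes) edges) v : Int) == 0)) := by
    rw [hitems, List.filter_map, List.map_map]
    simp [Function.comp_def]
  -- initial invariants for the Kahn loop, with F := the peeling fixpoint
  have hFfix := peelLoop_fix (pvEs (pvIds nodes) edges) (pvIds nodes)
  have hFsub := peelLoop_sub (pvEs (pvIds nodes) edges) (pvIds nodes)
  have hq_nd : ((pvIds nodes).filter
      (fun v => ((cntIn (pvEs (pvIds nodes) edges) v : Int) == 0))).Nodup := hnd.filter _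
  obtain ⟨Df, df, hkl, hDfnd, hDfids, hdfdeg, hdfiff, hdfF⟩ :=
    loopInv (pvEs (pvIds nodes) edges) (pvIds nodes) (peelLoop (pvEs (pvIds nodes) edges) (pvIds nodes))
      hFfix _ hadj (tgts_mem_ids (pvIds nodes) edges) _
      ((pvIds nodes).filter (fun v => ((cntIn (pvEs (pvIds nodes) edges) v : Int) == 0)))
      (edges.foldl (pvEdgeStep (pvIds nodes))
        (((pvIds nodes).foldl (fun d nid => d.insert nid []) PySem.Dict.empty),
         ((pvIds nodes).foldl (fun d nid => d.insert nid (0:Int)) PySem.Dict.empty))).2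
      [] (le_refl _)
      (by simpa using hq_nd)
      (by intro v hv; rw [List.nil_append] at hv; exact (List.mem_filter.mp hv).1)
      (by intro v; rw [hindeg v, fromCnt_nil]; omega)
      (by
        intro v hvids
        rw [List.nil_append, List.mem_filter, hindeg v]
        constructor
        · rintro ⟨-, hc⟩
          have : cntIn (pvEs (pvIds nodes) edges) v = 0 := by
            have := beq_iff_eq.mp hc
            omega
          omega
        · intro hle
          refine ⟨hvids, ?_⟩
          have : cntIn (pvEs (pvIds nodes) edges) v = 0 := by omega
          simp [this])
      (by
        intro v hv hc
        rw [List.nil_append, List.mem_filter] at hc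
        obtain ⟨e, he, hev, hea⟩ := hFfix v hv
        have h1 : 1 ≤ fromCnt (pvEs (pvIds nodes) edges)
            (peelLoop (pvEs (pvIds nodes) edges) (pvIds nodes)) v :=
          fromCnt_pos _ _ v e he hev hea
        have h2 := fromCnt_le (pvEs (pvIds nodes) edges)
          (peelLoop (pvEs (pvIds nodes) edges) (pvIds nodes)) v
        have := beq_iff_eq.mp hc.2
        omega)
  rw [hqueue]
  have hzero : ((([] : List String)).length : Int) = 0 := by simp
  rw [hzero] at hkl
  rw [hkl]
  have hlen : PySem.Set.len (pvIds nodes) = ((pvIds nodes).length : Int) := rfl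
  rw [hlen]
  by_cases hFe : peelLoop (pvEs (pvIds nodes) edges) (pvIds nodes) = []
  · -- fixpoint empty: the graph is a DAG, both sides are true
    rw [hFe]
    have hsubDf : ∀ v ∈ pvIds nodes, v ∈ Df := by
      intro v hvids
      by_contra hvnot
      have hSfix : ∀ w ∈ (pvIds nodes).filter (fun u => decide (u ∉ Df)),
          ∃ e ∈ pvEs (pvIds nodes) edges, e.2 = w ∧
            e.1 ∈ (pvIds nodes).filter (fun u => decide (u ∉ Df)) := by
        intro w hw
        obtain ⟨hwids, hwnot⟩ := List.mem_filter.mp hw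
        have hwnot' : w ∉ Df := by simpa using hwnot
        have hgt : ¬ df.getD w 0 ≤ 0 := fun hc => hwnot' ((hdfiff w hwids).mpr hc)
        rw [hdfdeg w] at hgt
        have hlt : fromCnt (pvEs (pvIds nodes) edges) Df w < cntIn (pvEs (pvIds nodes) edges) w := by
          omega
        obtain ⟨e, he, hev, heD⟩ := cntIn_lt_witness _ _ _ hlt
        refine ⟨e, he, hev, List.mem_filter.mpr
          ⟨(pvEs_mem (pvIds nodes) edges e he).1, by simpa using heD⟩⟩
      have := peelLoop_super (pvEs (pvIds nodes) edges) _ hSfix (pvIds nodes)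
        (fun w hw => (List.mem_filter.mp hw).1) v
        (List.mem_filter.mpr ⟨hvids, by simpa using hvnot⟩)
      rw [hFe] at this
      cases this
    have hle1 : Df.length ≤ (pvIds nodes).length := nodupLenLe Df (pvIds nodes) hDfnd hDfids
    have hle2 : (pvIds nodes).length ≤ Df.length := nodupLenLe (pvIds nodes) Df hnd hsubDf
    have : Df.length = (pvIds nodes).length := le_antisymm hle1 hle2
    simp [this]
  · -- fixpoint nonempty: a cycle survives, both sides are false
    obtain ⟨v, hv⟩ := List.exists_mem_of_ne_nil _ hFe
    have hvids : v ∈ pvIds nodes := hFsub v hv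
    have hvnot : v ∉ Df := hdfF v hv
    have hlt : Df.length < (pvIds nodes).length := nodupLenLt Df (pvIds nodes) hDfnd hDfids v hvids hvnot
    have h1 : (((Df.length : Int)) == ((pvIds nodes).length : Int)) = false := by
      simp only [beq_eq_false_iff_ne, ne_eq]
      omega
    rw [h1]
    have h2 : (peelLoop (pvEs (pvIds nodes) edges) (pvIds nodes)).isEmpty = false := by
      simpa [List.isEmpty_iff] using hFe
    rw [h2]
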